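-- pv_equiv track=rewrite | github.com/AhmedElsayed89/text_craft | textcraft.py | modify_text
-- ===== SOURCE A (Python) =====
-- def modify_text(text, pattern, m):
--     words = text.split()
--     modified_text = []
--     pattern_count = 0
--
--     for word in words:
--         if word == pattern:
--             pattern_count += 1
--             if pattern_count <= m:
--                 modified_text.append(word)
--         else:
--             modified_text.append(word)
--
--     return ' '.join(modified_text)
-- ===== SOURCE B (Python) =====
-- def modify_text(text, pattern, m):
--     words = text.split()
--     excess = words.count(pattern) - max(m, 0)
--     out = []
--     for w in reversed(words):
--         if w == pattern and excess > 0: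
--             excess -= 1
--         else:
--             out.append(w)
--     return ' '.join(reversed(out))
-- ===== Notes on version B (the rewrite author's own statement) =====
-- stated objective: alternative
-- what changed: Instead of a forward guarded-append loop with a running occurrence counter, B counts the pattern once, then scans the words backwards deleting exactly the excess (last) occurrences, building the output back-to-front.
import Mathlib
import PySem

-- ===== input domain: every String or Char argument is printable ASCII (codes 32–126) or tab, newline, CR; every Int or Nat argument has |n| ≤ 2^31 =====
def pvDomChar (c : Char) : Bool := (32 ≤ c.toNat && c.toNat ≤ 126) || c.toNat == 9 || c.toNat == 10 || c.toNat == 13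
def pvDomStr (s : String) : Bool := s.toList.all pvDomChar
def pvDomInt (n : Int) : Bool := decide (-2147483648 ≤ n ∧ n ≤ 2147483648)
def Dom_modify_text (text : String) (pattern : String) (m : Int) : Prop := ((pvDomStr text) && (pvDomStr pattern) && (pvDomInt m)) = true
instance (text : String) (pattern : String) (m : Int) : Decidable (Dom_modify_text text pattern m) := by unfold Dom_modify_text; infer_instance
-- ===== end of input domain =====

-- B keeps the same return value but by a different route: it counts the pattern once, then
-- scans the words backwards deleting the excess (last) occurrences, building output back-to-front.

-- ===== PORT A =====
def modify_text (text : String) (pattern : String) (m : Int) : String :=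
  let words := PySem.Str.split₀ text
  let res := words.foldl
    (fun (st : List String × Int) word =>
      if word == pattern then
        let c := st.2 + 1
        if c ≤ m then (st.1 ++ [word], c) else (st.1, c)
      else (st.1 ++ [word], st.2))
    ([], 0)
  PySem.Str.join " " res.1

-- ===== PORT B =====
def modify_text_alt (text : String) (pattern : String) (m : Int) : String :=
  let words := PySem.Str.split₀ text
  let excess : Int := (PySem.List.count words pattern : Int) - max m 0
  let res := words.reverse.foldl
    (fun (st : Int × List String) w =>
      if w == pattern && decide (0 < st.1) then (st.1 - 1, st.2) else (st.1, st.2 ++ [w]))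
    (excess, [])
  PySem.Str.join " " res.2.reverse

-- ===== PRECONDITION & SPEC =====
def Spec_modify_text (text : String) (pattern : String) (m : Int) (out : String) : Prop := out = modify_text_alt text pattern m
instance (text : String) (pattern : String) (m : Int) (out : String) : Decidable (Spec_modify_text text pattern m out) := by unfold Spec_modify_text; infer_instance

-- ===== CLAIM (what is proved, stated in full; the proofs are below) =====
def Claim_equal_modify_text : Prop := ∀ (text : String) (pattern : String) (m : Int), Dom_modify_text text pattern m → Spec_modify_text text pattern m (modify_text text pattern m)

-- ===== LEMMAS AND PROOFS =====

-- A's loop step (forward, running counter) and B's loop step (backward, remaining excess)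
def astep (p : String) (m : Int) : List String × Int → String → List String × Int :=
  fun st word =>
    if word == p then
      let c := st.2 + 1
      if c ≤ m then (st.1 ++ [word], c) else (st.1, c)
    else (st.1 ++ [word], st.2)

def bstep (p : String) : Int × List String → String → Int × List String :=
  fun st w => if w == p && decide (0 < st.1) then (st.1 - 1, st.2) else (st.1, st.2 ++ [w])

-- the common "keep the first k occurrences of p" shape both loops compute
def fBudget (p : String) : List String → Int → List String
  | [], _ => []
  | w :: ws, k =>
    if w == p then (if 0 < k then w :: fBudget p ws (k - 1) else fBudget p ws k)
    else w :: fBudget p ws k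

-- B's kept list (in original order) as a function of the initial excess
def gB (p : String) (ws : List String) (e : Int) : List String :=
  ((ws.reverse.foldl (bstep p) (e, [])).2).reverse

theorem bstep_eq (p : String) (st : Int × List String) (w : String) :
    bstep p st w = if (w == p && decide (0 < st.1)) = true then (st.1 - 1, st.2)
      else (st.1, st.2 ++ [w]) := rfl

theorem fBudget_cons (p w : String) (ws : List String) (k : Int) :
    fBudget p (w :: ws) k =
      if (w == p) = true then (if 0 < k then w :: fBudget p ws (k - 1) else fBudget p ws k)
      else w :: fBudget p ws k := rfl

theorem bfst (p : String) : ∀ (L : List String) (e : Int) (out : List String),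
    (L.foldl (bstep p) (e, out)).1 = e - min (max e 0) (List.count p L : Int) := by
  intro L
  induction L with
  | nil => intro e out; simp
  | cons w L ih =>
    intro e out
    by_cases hw : w = p
    · by_cases he : 0 < e
      · simp [List.foldl_cons, bstep, hw, he, ih]
        omega
      · simp [List.foldl_cons, bstep, hw, he, ih]
        omega
    · simp [List.foldl_cons, bstep, hw, ih]

theorem g_cons (p w : String) (ws : List String) (e : Int) :
    gB p (w :: ws) e =
      if w = p ∧ 0 < e - min (max e 0) (List.count p ws : Int) then gB p ws e
      else w :: gB p ws e := by
  have hs1 : (ws.reverse.foldl (bstep p) (e, ([] : List String))).1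
      = e - min (max e 0) (List.count p ws : Int) := by
    rw [bfst, List.count_reverse]
  unfold gB
  rw [List.reverse_cons, List.foldl_append, List.foldl_cons, List.foldl_nil]
  by_cases hcond : w = p ∧ 0 < e - min (max e 0) (List.count p ws : Int)
  · rw [if_pos hcond]
    have hc0 : (0 : Int) ≤ (List.count p ws : Int) := Int.natCast_nonneg _
    obtain ⟨h1, h2⟩ := hcond
    have hb : (w == p && decide (0 < (ws.reverse.foldl (bstep p) (e, ([] : List String))).1))
        = true := by
      rw [hs1]; simp [h1]; omega
    rw [bstep_eq, if_pos hb]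
  · rw [if_neg hcond]
    have hb : ¬ (w == p && decide (0 < (ws.reverse.foldl (bstep p) (e, ([] : List String))).1))
        = true := by
      rw [hs1]; simpa using hcond
    rw [bstep_eq, if_neg hb, List.reverse_append]
    simp

theorem f_nonpos (p : String) : ∀ (ws : List String) (k : Int), k ≤ 0 →
    fBudget p ws k = fBudget p ws 0 := by
  intro ws
  induction ws with
  | nil => intro k hk; simp [fBudget]
  | cons w ws ih =>
    intro k hk
    by_cases hw : w = p
    · simp [fBudget, hw, show ¬ (0 : Int) < k by omega, ih k hk]
    · simp [fBudget, hw, ih k hk]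

theorem g_sat (p : String) : ∀ (ws : List String) (e : Int),
    (List.count p ws : Int) ≤ e → gB p ws e = fBudget p ws 0 := by
  intro ws
  induction ws with
  | nil => intro e he; simp [gB, fBudget]
  | cons w ws ih =>
    intro e he
    rw [g_cons]
    by_cases hw : w = p
    · have hc : (List.count p (w :: ws) : Int) = (List.count p ws : Int) + 1 := by
        simp [hw]
      rw [hc] at he
      rw [if_pos ⟨hw, by omega⟩, ih e (by omega)]
      simp [fBudget, hw]
    · have hc : (List.count p (w :: ws) : Int) = (List.count p ws : Int) := by
        simp [hw]
      rw [hc] at he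
      rw [if_neg (by simp [hw]), ih e he]
      simp [fBudget, hw]

theorem g_eq_f (p : String) : ∀ (ws : List String) (k : Int), 0 ≤ k →
    gB p ws ((List.count p ws : Int) - k) = fBudget p ws k := by
  intro ws
  induction ws with
  | nil => intro k hk; simp [gB, fBudget]
  | cons w ws ih =>
    intro k hk
    have hc0 : (0 : Int) ≤ (List.count p ws : Int) := Int.natCast_nonneg _
    rw [g_cons]
    by_cases hw : w = p
    · have hc : (List.count p (w :: ws) : Int) = (List.count p ws : Int) + 1 := by
        simp [hw]
      rw [hc]
      by_cases hk0 : 0 < k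
      · have hcond : ¬ (w = p ∧ 0 < ((List.count p ws : Int) + 1 - k)
            - min (max ((List.count p ws : Int) + 1 - k) 0) (List.count p ws : Int)) := by
          rintro ⟨-, h⟩; omega
        rw [if_neg hcond,
          show (List.count p ws : Int) + 1 - k = (List.count p ws : Int) - (k - 1) by ring,
          ih (k - 1) (by omega)]
        simp [fBudget, hw, hk0]
      · have hk0' : k = 0 := by omega
        subst hk0'
        rw [if_pos ⟨hw, by omega⟩,
          show (List.count p ws : Int) + 1 - 0 = (List.count p ws : Int) + 1 by ring,
          g_sat p ws _ (by omega)]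
        simp [fBudget, hw]
    · have hc : (List.count p (w :: ws) : Int) = (List.count p ws : Int) := by
        simp [hw]
      rw [hc, if_neg (by simp [hw]), ih k hk]
      simp [fBudget, hw]

theorem aloop (p : String) (m : Int) : ∀ (ws : List String) (acc : List String) (cnt : Int),
    (ws.foldl (astep p m) (acc, cnt)).1 = acc ++ fBudget p ws (m - cnt) := by
  intro ws
  induction ws with
  | nil => intro acc cnt; simp [fBudget]
  | cons w ws ih =>
    intro acc cnt
    rw [List.foldl_cons]
    by_cases hw : w = p
    · by_cases hc : cnt + 1 ≤ m
      · have hstep : astep p m (acc, cnt) w = (acc ++ [w], cnt + 1) := by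
          simp [astep, hw, hc]
        have hf : fBudget p (w :: ws) (m - cnt) = w :: fBudget p ws (m - cnt - 1) := by
          rw [fBudget_cons, if_pos (by simp [hw]), if_pos (by omega : (0 : Int) < m - cnt)]
        rw [hstep, ih, hf, show m - (cnt + 1) = m - cnt - 1 by ring]
        simp
      · have hstep : astep p m (acc, cnt) w = (acc, cnt + 1) := by
          simp [astep, hw, hc]
        have hf : fBudget p (w :: ws) (m - cnt) = fBudget p ws (m - cnt) := by
          rw [fBudget_cons, if_pos (by simp [hw]), if_neg (by omega : ¬ (0 : Int) < m - cnt)]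
        rw [hstep, ih, hf, f_nonpos p ws (m - (cnt + 1)) (by omega),
          f_nonpos p ws (m - cnt) (by omega)]
    · have hstep : astep p m (acc, cnt) w = (acc ++ [w], cnt) := by
        simp [astep, hw]
      have hf : fBudget p (w :: ws) (m - cnt) = w :: fBudget p ws (m - cnt) := by
        simp [fBudget, hw]
      rw [hstep, ih, hf]
      simp

-- ===== VERDICT (by name: the statement is the Claim_ definition above) =====
theorem modify_text_spec : Claim_equal_modify_text := by
  intro text pattern m _
  unfold Spec_modify_text modify_text modify_text_alt
  show PySem.Str.join " " (((PySem.Str.split₀ text).foldl (astep pattern m) ([], 0)).1)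
      = PySem.Str.join " " (gB pattern (PySem.Str.split₀ text)
          ((PySem.List.count (PySem.Str.split₀ text) pattern : Int) - max m 0))
  rw [PySem.List.count_eq]
  congr 1
  rw [aloop pattern m (PySem.Str.split₀ text) [] 0]
  simp only [List.nil_append, Int.sub_zero]
  by_cases hm : 0 ≤ m
  · rw [show max m 0 = m by omega, g_eq_f pattern _ m hm]
  · rw [show max m 0 = 0 by omega, g_eq_f pattern _ 0 le_rfl,
      f_nonpos pattern _ m (by omega)]
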